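-- pv_equiv track=rewrite | github.com/ZIYU-DEEP/semantic-embeddings | CUB-Hierarchy/encode_hierarchy.py | encode_class_names
-- ===== SOURCE A (Python) =====
-- def encode_class_names(hierarchy, initial_labels):
--
--     class_names = [lbl for lbl in initial_labels]
--     class_ind = { lbl : i for i, lbl in enumerate(class_names) }
--
--     hierarchy_names = list(hierarchy.keys())
--     for name in hierarchy_names:
--
--         if name in class_ind:
--             ind = class_ind[name]
--         else:
--             ind = len(class_names)
--             class_ind[name] = ind
--             class_names.append(name)
--
--         encoded_children = set()
--         for child in hierarchy[name]:
--             if child in class_ind: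
--                 encoded_children.add(class_ind[child])
--             else:
--                 encoded_children.add(len(class_names))
--                 class_ind[child] = len(class_names)
--                 class_names.append(child)
--
--         hierarchy[ind] = encoded_children
--         del hierarchy[name]
--
--     return hierarchy, class_names
-- ===== SOURCE B (Python) =====
-- def encode_class_names(hierarchy, initial_labels):
--     # Pass 1: collect every name (keys first, then their children, entry by entry)
--     # in first-seen order, then build the index table once.
--     class_names = list(initial_labels)
--     seen = set(class_names)
--     for name, children in hierarchy.items():
--         for n in (name, *children):
--             if n not in seen:
--                 seen.add(n)
--                 class_names.append(n)
--     class_ind = {n: i for i, n in enumerate(class_names)}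
--     # Pass 2: re-encode every entry through the completed table, in place.
--     new_items = [(class_ind[n], {class_ind[c] for c in cs}) for n, cs in hierarchy.items()]
--     hierarchy.clear()
--     hierarchy.update(new_items)
--     return hierarchy, class_names
-- ===== Notes on version B (the rewrite author's own statement) =====
-- stated objective: alternative
-- what changed: B splits A's single interleaved pass (which assigns indices while encoding each entry) into two passes: pass 1 collects all names in first-seen order and builds the index table once, pass 2 re-encodes every entry through the completed table.
import Mathlib
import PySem

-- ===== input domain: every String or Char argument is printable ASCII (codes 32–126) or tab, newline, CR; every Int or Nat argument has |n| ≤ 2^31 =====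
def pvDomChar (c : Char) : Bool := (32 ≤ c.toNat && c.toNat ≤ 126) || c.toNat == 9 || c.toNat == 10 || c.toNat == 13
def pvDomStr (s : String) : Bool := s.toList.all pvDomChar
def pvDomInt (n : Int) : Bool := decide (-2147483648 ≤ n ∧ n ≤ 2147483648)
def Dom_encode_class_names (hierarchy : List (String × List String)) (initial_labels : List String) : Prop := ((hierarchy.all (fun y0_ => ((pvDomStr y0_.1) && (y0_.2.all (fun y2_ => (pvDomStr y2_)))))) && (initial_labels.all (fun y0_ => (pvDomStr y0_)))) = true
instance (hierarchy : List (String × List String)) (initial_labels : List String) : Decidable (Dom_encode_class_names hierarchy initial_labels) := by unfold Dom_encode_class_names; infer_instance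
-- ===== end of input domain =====

-- B re-encodes in two passes (index table built first) instead of A's interleaved pass; both
-- Pythons mutate `hierarchy` in place the same way, the theorems are about the return value.

-- ===== PORT A =====
-- { lbl : i for i, lbl in enumerate(ns) } — the dict comprehension both Pythons write
def mkIndex (ns : List String) : PySem.Dict String Int :=
  (PySem.List.enumerate ns 0).foldl (fun d p => d.insert p.2 p.1) PySem.Dict.empty

-- body of A's inner `for child in hierarchy[name]` loop; state (encoded_children, class_names, class_ind)
def encAChild (st : (PySem.Set Int) × List String × PySem.Dict String Int) (child : String) :
    (PySem.Set Int) × List String × PySem.Dict String Int :=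
  match (st.2.2).get? child with
  | some j => (PySem.Set.add st.1 j, st.2.1, st.2.2)
  | none => (PySem.Set.add st.1 ((st.2.1.length : Int)), st.2.1 ++ [child],
      (st.2.2).insert child ((st.2.1.length : Int)))

-- body of A's outer loop; `hierarchy[ind] = …; del hierarchy[name]` rewrites the unique
-- string key `name` into the int key `ind` at the end of the dict, i.e. appends the item
def encAStep (st : List (Int × List Int) × List String × PySem.Dict String Int)
    (e : String × List String) : List (Int × List Int) × List String × PySem.Dict String Int :=
  match st with
  | (out, names, ci) =>
    let r : Int × List String × PySem.Dict String Int :=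
      match ci.get? e.1 with
      | some i => (i, names, ci)
      | none => ((names.length : Int), names ++ [e.1], ci.insert e.1 ((names.length : Int)))
    let r2 := e.2.foldl encAChild (PySem.Set.empty, r.2.1, r.2.2)
    (out ++ [(r.1, r2.1)], r2.2.1, r2.2.2)

def encode_class_names (hierarchy : List (String × List String)) (initial_labels : List String) :
    (List (Int × List Int)) × List String :=
  let class_names := initial_labels.map (fun lbl => lbl)
  let class_ind := mkIndex class_names
  let r := hierarchy.foldl encAStep ([], class_names, class_ind)
  (r.1, r.2.1)

-- ===== PORT B =====
-- body of B's `if n not in seen: seen.add(n); class_names.append(n)`; state (class_names, seen)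
def encBSeen (st : List String × PySem.Set String) (n : String) : List String × PySem.Set String :=
  if st.2.contains n then st else (st.1 ++ [n], PySem.Set.add st.2 n)

def encode_class_names_alt (hierarchy : List (String × List String)) (initial_labels : List String) :
    (List (Int × List Int)) × List String :=
  -- Pass 1: first-seen name list and the index table
  let st := hierarchy.foldl (fun st e => (e.1 :: e.2).foldl encBSeen st)
      (initial_labels, PySem.Set.ofList initial_labels)
  let class_names := st.1
  let class_ind := mkIndex class_names
  -- Pass 2: re-encode every entry through the completed table (clear+update = these items)
  let new_items := hierarchy.map (fun e =>
      (class_ind.getD e.1 0, PySem.Set.ofList (e.2.map (fun c => class_ind.getD c 0))))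
  (new_items, class_names)

-- ===== PRECONDITION & SPEC =====
def Spec_encode_class_names (hierarchy : List (String × List String)) (initial_labels : List String) (out : (List (Int × List Int)) × List String) : Prop := out = encode_class_names_alt hierarchy initial_labels
instance (hierarchy : List (String × List String)) (initial_labels : List String) (out : (List (Int × List Int)) × List String) : Decidable (Spec_encode_class_names hierarchy initial_labels out) := by unfold Spec_encode_class_names; infer_instance

-- ===== CLAIM (what is proved, stated in full; the proofs are below) =====
def Claim_equal_encode_class_names : Prop := ∀ (hierarchy : List (String × List String)) (initial_labels : List String), Dom_encode_class_names hierarchy initial_labels → Spec_encode_class_names hierarchy initial_labels (encode_class_names hierarchy initial_labels)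

-- ===== LEMMAS AND PROOFS =====

-- the evolution of class_names under one name: append iff unseen
def ext1 (ns : List String) (n : String) : List String := if n ∈ ns then ns else ns ++ [n]

def idxOf (ns : List String) (n : String) : Int := (mkIndex ns).getD n 0

-- class_names after processing one hierarchy entry / the whole hierarchy
def stepNs (ns : List String) (e : String × List String) : List String :=
  (e.1 :: e.2).foldl ext1 ns

def nsAll (hs : List (String × List String)) (ns : List String) : List String :=
  hs.foldl stepNs ns

lemma mkIndex_append (ns : List String) (n : String) :
    mkIndex (ns ++ [n]) = (mkIndex ns).insert n ((ns.length : Int)) := by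
  simp [mkIndex, PySem.List.enumerate_append, List.foldl_append]

lemma get?_mkIndex_none (ns : List String) (n : String) :
    (mkIndex ns).get? n = none ↔ ¬ n ∈ ns := by
  induction ns using List.reverseRecOn with
  | nil => simp [mkIndex, PySem.Dict.get?_empty]
  | append_singleton ns m ih =>
    rw [mkIndex_append, PySem.Dict.get?_insert]
    by_cases h : n = m <;> simp [h, ih]

lemma get?_mkIndex_of_mem {ns : List String} {n : String} (hn : n ∈ ns) :
    (mkIndex ns).get? n = some (idxOf ns n) := by
  cases hg : (mkIndex ns).get? n with
  | none => exact absurd hn ((get?_mkIndex_none ns n).1 hg)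
  | some v => simp [idxOf, PySem.Dict.getD_eq_get?_getD, hg]

lemma idxOf_ext1 (ns : List String) (m n : String) (hn : n ∈ ns) :
    idxOf (ext1 ns m) n = idxOf ns n := by
  unfold ext1; split_ifs with h
  · rfl
  · have hne : n ≠ m := by rintro rfl; exact h hn
    simp [idxOf, mkIndex_append, PySem.Dict.getD_insert, hne]

lemma mem_ext1 (ns : List String) (m n : String) (hn : n ∈ ns) : n ∈ ext1 ns m := by
  unfold ext1; split_ifs with h
  · exact hn
  · exact List.mem_append_left _ hn

lemma self_mem_ext1 (ns : List String) (n : String) : n ∈ ext1 ns n := by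
  unfold ext1; split_ifs with h
  · exact h
  · simp

lemma idxOf_foldl_ext1 (l : List String) : ∀ (ns : List String) (n : String), n ∈ ns →
    idxOf (l.foldl ext1 ns) n = idxOf ns n ∧ n ∈ l.foldl ext1 ns := by
  induction l with
  | nil => intro ns n h; exact ⟨rfl, h⟩
  | cons m l ih =>
    intro ns n h
    obtain ⟨e1, e2⟩ := ih (ext1 ns m) n (mem_ext1 ns m n h)
    rw [List.foldl_cons]
    exact ⟨by rw [e1, idxOf_ext1 ns m n h], e2⟩

lemma mem_foldl_ext1_self (l : List String) : ∀ (ns : List String) (n : String), n ∈ l →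
    n ∈ l.foldl ext1 ns := by
  induction l with
  | nil => intro _ _ h; cases h
  | cons m l ih =>
    intro ns n h
    rw [List.foldl_cons]
    rcases List.mem_cons.1 h with rfl | h
    · exact (idxOf_foldl_ext1 l (ext1 ns n) n (self_mem_ext1 ns n)).2
    · exact ih _ n h

lemma nsAll_eq_flat (hs : List (String × List String)) : ∀ ns,
    nsAll hs ns = (hs.flatMap (fun e => e.1 :: e.2)).foldl ext1 ns := by
  induction hs with
  | nil => intro ns; rfl
  | cons e hs ih => intro ns; simp [nsAll, List.foldl_append, stepNs] at *; rw [ih]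

lemma idxOf_nsAll (hs : List (String × List String)) (ns : List String) (n : String)
    (hn : n ∈ ns) : idxOf (nsAll hs ns) n = idxOf ns n ∧ n ∈ nsAll hs ns := by
  rw [nsAll_eq_flat]
  exact idxOf_foldl_ext1 _ ns n hn

-- A's inner loop, characterised against the canonical name evolution
lemma childLoop (cs : List String) : ∀ (enc : PySem.Set Int) (ns : List String),
    cs.foldl encAChild (enc, ns, mkIndex ns) =
      (cs.foldl (fun s c => PySem.Set.add s (idxOf (cs.foldl ext1 ns) c)) enc,
        cs.foldl ext1 ns, mkIndex (cs.foldl ext1 ns)) := by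
  induction cs with
  | nil => intros; rfl
  | cons c cs ih =>
    intro enc ns
    simp only [List.foldl_cons]
    by_cases h : c ∈ ns
    · have hstep : encAChild (enc, ns, mkIndex ns) c = (PySem.Set.add enc (idxOf ns c), ns, mkIndex ns) := by
        simp [encAChild, get?_mkIndex_of_mem h]
      have hext : ext1 ns c = ns := if_pos h
      rw [hstep, ih, hext, (idxOf_foldl_ext1 cs ns c h).1]
    · have hget : (mkIndex ns).get? c = none := (get?_mkIndex_none ns c).2 h
      have hstep : encAChild (enc, ns, mkIndex ns) c =
          (PySem.Set.add enc ((ns.length : Int)), ns ++ [c], mkIndex (ns ++ [c])) := by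
        simp [encAChild, hget, mkIndex_append]
      have hext : ext1 ns c = ns ++ [c] := if_neg h
      have hidx : idxOf (ns ++ [c]) c = (ns.length : Int) := by
        simp [idxOf, mkIndex_append]
      rw [hstep, ih, hext, (idxOf_foldl_ext1 cs (ns ++ [c]) c (by simp)).1, hidx]

lemma stepA (out : List (Int × List Int)) (ns : List String) (e : String × List String) :
    encAStep (out, ns, mkIndex ns) e =
      (out ++ [(idxOf (stepNs ns e) e.1,
        PySem.Set.ofList (e.2.map (fun c => idxOf (stepNs ns e) c)))],
        stepNs ns e, mkIndex (stepNs ns e)) := by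
  have hset : ∀ (l : List String) (m : List String),
      l.foldl (fun s c => PySem.Set.add s (idxOf m c)) PySem.Set.empty =
        PySem.Set.ofList (l.map (fun c => idxOf m c)) := by
    intro l m
    rw [PySem.Set.ofList_eq_foldl, List.foldl_map]
    rfl
  by_cases h : e.1 ∈ ns
  · have hext : ext1 ns e.1 = ns := if_pos h
    have hmem : e.1 ∈ e.2.foldl ext1 ns := (idxOf_foldl_ext1 e.2 ns e.1 h).2
    simp only [encAStep, get?_mkIndex_of_mem h, childLoop, hset]
    rw [show stepNs ns e = e.2.foldl ext1 ns by simp [stepNs, hext]]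
    have : idxOf ns e.1 = idxOf (e.2.foldl ext1 ns) e.1 := ((idxOf_foldl_ext1 e.2 ns e.1 h).1).symm
    rw [this]
  · have hget : (mkIndex ns).get? e.1 = none := (get?_mkIndex_none ns e.1).2 h
    have hext : ext1 ns e.1 = ns ++ [e.1] := if_neg h
    have hidx : idxOf (ns ++ [e.1]) e.1 = (ns.length : Int) := by
      simp [idxOf, mkIndex_append]
    simp only [encAStep, hget]
    rw [show ((mkIndex ns).insert e.1 ((ns.length : Int))) = mkIndex (ns ++ [e.1]) from (mkIndex_append ns e.1).symm]
    rw [childLoop, hset]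
    rw [show stepNs ns e = e.2.foldl ext1 (ns ++ [e.1]) by simp [stepNs, hext]]
    have : (ns.length : Int) = idxOf (e.2.foldl ext1 (ns ++ [e.1])) e.1 := by
      rw [(idxOf_foldl_ext1 e.2 (ns ++ [e.1]) e.1 (by simp)).1, hidx]
    rw [this]

lemma mainA (hs : List (String × List String)) : ∀ (out : List (Int × List Int)) (ns : List String),
    hs.foldl encAStep (out, ns, mkIndex ns) =
      (out ++ hs.map (fun e => (idxOf (nsAll hs ns) e.1,
          PySem.Set.ofList (e.2.map (fun c => idxOf (nsAll hs ns) c)))),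
        nsAll hs ns, mkIndex (nsAll hs ns)) := by
  induction hs with
  | nil => intro out ns; simp [nsAll]
  | cons e hs ih =>
    intro out ns
    rw [List.foldl_cons, stepA, ih]
    have hns : nsAll (e :: hs) ns = nsAll hs (stepNs ns e) := rfl
    have hmem1 : e.1 ∈ stepNs ns e := by
      apply mem_foldl_ext1_self
      exact List.mem_cons_self
    have h1 : idxOf (stepNs ns e) e.1 = idxOf (nsAll hs (stepNs ns e)) e.1 :=
      ((idxOf_nsAll hs (stepNs ns e) e.1 hmem1).1).symm
    have h2 : (e.2.map (fun c => idxOf (stepNs ns e) c)) =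
        (e.2.map (fun c => idxOf (nsAll hs (stepNs ns e)) c)) := by
      apply List.map_congr_left
      intro c hc
      have hmemc : c ∈ stepNs ns e := mem_foldl_ext1_self _ ns c (List.mem_cons_of_mem _ hc)
      exact ((idxOf_nsAll hs (stepNs ns e) c hmemc).1).symm
    rw [hns, List.map_cons, h1, h2, List.append_assoc]
    rfl

-- B's pass 1, characterised against the same canonical name evolution
lemma bSeen (l : List String) : ∀ (ns : List String),
    l.foldl encBSeen (ns, PySem.Set.ofList ns) =
      (l.foldl ext1 ns, PySem.Set.ofList (l.foldl ext1 ns)) := by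
  induction l with
  | nil => intro ns; rfl
  | cons n l ih =>
    intro ns
    rw [List.foldl_cons, List.foldl_cons]
    by_cases h : n ∈ ns
    · have hext : ext1 ns n = ns := if_pos h
      rw [show encBSeen (ns, PySem.Set.ofList ns) n = (ns, PySem.Set.ofList ns) by
        simpa [encBSeen] using h, hext, ih]
    · have hext : ext1 ns n = ns ++ [n] := if_neg h
      have hof : PySem.Set.add (PySem.Set.ofList ns) n = PySem.Set.ofList (ns ++ [n]) := by
        rw [PySem.Set.ofList_eq_foldl, PySem.Set.ofList_eq_foldl, List.foldl_append]
        rfl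
      rw [show encBSeen (ns, PySem.Set.ofList ns) n = (ns ++ [n], PySem.Set.ofList (ns ++ [n])) by
        simpa [encBSeen, hof] using h, hext, ih]

lemma bPass1 (hs : List (String × List String)) : ∀ (ns : List String),
    hs.foldl (fun st e => (e.1 :: e.2).foldl encBSeen st) (ns, PySem.Set.ofList ns) =
      (nsAll hs ns, PySem.Set.ofList (nsAll hs ns)) := by
  induction hs with
  | nil => intro ns; rfl
  | cons e hs ih =>
    intro ns
    rw [List.foldl_cons, bSeen, ih]
    rfl

-- ===== VERDICT (by name: the statement is the Claim_ definition above) =====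
theorem encode_class_names_spec : Claim_equal_encode_class_names := by
  intro hierarchy initial_labels _
  unfold Spec_encode_class_names encode_class_names encode_class_names_alt
  rw [show initial_labels.map (fun lbl => lbl) = initial_labels from List.map_id' initial_labels]
  rw [bPass1]
  dsimp only
  rw [mainA]
  rfl
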